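-- pv_equiv track=rewrite | github.com/Lily-Evan/Semantic-Storytelling-Vacuum | vacum.py | boustrophedon
-- ===== SOURCE A (Python) =====
-- from collections import defaultdict, deque
--
-- def boustrophedon(cells):
--     byrow=defaultdict(list)
--     for r,c in cells: byrow[r].append(c)
--     rows=sorted(byrow.keys())
--     for r in rows: byrow[r].sort()
--     order=[]; flip=False
--     for r in rows:
--         cols = byrow[r][::-1] if flip else byrow[r]
--         order += [(r,c) for c in cols]
--         flip = not flip
--     return order
-- ===== SOURCE B (Python) =====
-- def boustrophedon(cells):
--     rows = sorted({r for r, _ in cells})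
--     parity = {r: i % 2 == 1 for i, r in enumerate(rows)}
--     return sorted(cells, key=lambda rc: (rc[0], -rc[1] if parity[rc[0]] else rc[1]))
-- ===== Notes on version B (the rewrite author's own statement) =====
-- stated objective: alternative
-- what changed: B replaces A's group-by-row dict, per-row sorts and alternate-row reversal with one global sort of all cells under a signed lexicographic key (r, c) / (r, -c) chosen by the parity of r's position among the sorted distinct rows.
import Mathlib
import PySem

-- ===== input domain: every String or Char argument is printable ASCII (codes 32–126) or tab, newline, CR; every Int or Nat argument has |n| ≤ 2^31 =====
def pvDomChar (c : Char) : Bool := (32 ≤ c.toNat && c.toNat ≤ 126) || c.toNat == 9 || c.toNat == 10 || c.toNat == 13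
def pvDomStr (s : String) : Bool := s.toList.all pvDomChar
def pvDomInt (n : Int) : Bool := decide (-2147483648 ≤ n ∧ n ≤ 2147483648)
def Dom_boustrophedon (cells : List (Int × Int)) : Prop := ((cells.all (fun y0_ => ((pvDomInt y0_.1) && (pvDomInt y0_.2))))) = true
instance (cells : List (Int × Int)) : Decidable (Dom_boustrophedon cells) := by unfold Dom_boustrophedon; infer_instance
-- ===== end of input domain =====

-- B re-implements the zigzag ordering as one global sort with a row-parity-signed column key
-- (alternative decomposition, same O(n log n) cost); A groups by row and flips alternate rows.

-- ===== PORT A =====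
def boustrophedon (cells : List (Int × Int)) : List (Int × Int) :=
  -- byrow=defaultdict(list); for r,c in cells: byrow[r].append(c)
  let byrow : PySem.Dict Int (List Int) :=
    cells.foldl (fun d rc => d.modify rc.1 [] (fun l => l ++ [rc.2])) PySem.Dict.empty
  -- rows=sorted(byrow.keys())
  let rows := PySem.List.sorted byrow.keys (fun x => x)
  -- for r in rows: byrow[r].sort()
  let byrow2 := rows.foldl (fun d r => d.insert r (PySem.List.sorted (d.getD r []) (fun x => x))) byrow
  -- order=[]; flip=False; for r in rows: … ; byrow[r][::-1] is slice with step -1 (never raises)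
  let loop := rows.foldl (fun (st : List (Int × Int) × Bool) r =>
      let cols := if st.2 then ((PySem.List.slice? (byrow2.getD r []) none none (-1)).getD [])
                  else byrow2.getD r []
      (st.1 ++ cols.map (fun c => (r, c)), !st.2)) ([], false)
  loop.1

-- ===== PORT B =====
def boustrophedon_alt (cells : List (Int × Int)) : List (Int × Int) :=
  -- rows = sorted({r for r, _ in cells})
  let rows := PySem.List.sorted (PySem.Set.ofList (cells.map (fun rc => rc.1))) (fun x => x)
  -- parity = {r: i % 2 == 1 for i, r in enumerate(rows)}
  let parity : PySem.Dict Int Bool :=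
    (PySem.List.enumerate rows).foldl (fun d ir => d.insert ir.2 (decide (PySem.Int.mod ir.1 2 = 1))) PySem.Dict.empty
  -- sorted(cells, key=lambda rc: (rc[0], -rc[1] if parity[rc[0]] else rc[1]))
  -- parity[rc[0]] always hits (rc[0] ∈ rows), so getD false is exact
  PySem.List.sorted2 cells (fun rc => rc.1)
    (fun rc => if parity.getD rc.1 false then -rc.2 else rc.2)

-- ===== PRECONDITION & SPEC =====
def Spec_boustrophedon (cells : List (Int × Int)) (out : List (Int × Int)) : Prop := out = boustrophedon_alt cells
instance (cells : List (Int × Int)) (out : List (Int × Int)) : Decidable (Spec_boustrophedon cells out) := by unfold Spec_boustrophedon; infer_instance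

-- ===== CLAIM (what is proved, stated in full; the proofs are below) =====
def Claim_equal_boustrophedon : Prop := ∀ (cells : List (Int × Int)), Dom_boustrophedon cells → Spec_boustrophedon cells (boustrophedon cells)

-- ===== LEMMAS AND PROOFS =====

-- the distinct rows, sorted (both ports compute this list)
def pvRows (cells : List (Int × Int)) : List Int :=
  PySem.List.sorted (PySem.Set.ofList (cells.map (fun rc => rc.1))) (fun x => x)

-- columns of row r, in input order
def pvGrp (cells : List (Int × Int)) (r : Int) : List Int :=
  (cells.filter (fun p => p.1 == r)).map (fun p => p.2)

-- B's parity dict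
def pvParity (cells : List (Int × Int)) : PySem.Dict Int Bool :=
  (PySem.List.enumerate (pvRows cells)).foldl
    (fun d ir => d.insert ir.2 (decide (PySem.Int.mod ir.1 2 = 1))) PySem.Dict.empty

def pvPd (cells : List (Int × Int)) (r : Int) : Bool := (pvParity cells).getD r false

-- B's sort key, lexicographic
def pvKey (cells : List (Int × Int)) (rc : Int × Int) : Lex (Int × Int) :=
  toLex (rc.1, if pvPd cells rc.1 then -rc.2 else rc.2)

-- A's zigzag concatenation, abstracted over the per-row column list g
def pvZig (g : Int → List Int) : List Int → Bool → List (Int × Int)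
  | [], _ => []
  | r :: t, flip => ((if flip then (g r).reverse else g r).map (fun c => (r, c))) ++ pvZig g t (!flip)

theorem pvZig_congr (g g' : Int → List Int) (l : List Int) (f : Bool)
    (h : ∀ r ∈ l, g r = g' r) : pvZig g l f = pvZig g' l f := by
  induction l generalizing f with
  | nil => rfl
  | cons r t ih =>
    simp only [pvZig, h r List.mem_cons_self,
      ih (!f) (fun r' hr' => h r' (List.mem_cons_of_mem _ hr'))]

theorem pvZig_fst_mem (g : Int → List Int) (l : List Int) (f : Bool) :
    ∀ x ∈ pvZig g l f, x.1 ∈ l := by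
  induction l generalizing f with
  | nil => simp [pvZig]
  | cons r t ih =>
    intro x hx
    simp only [pvZig, List.mem_append, List.mem_map] at hx
    rcases hx with ⟨c, _, rfl⟩ | hx
    · simp
    · exact List.mem_cons_of_mem _ (ih (!f) x hx)

-- A's accumulator loop is pvZig
theorem pvZig_loop (g : Int → List Int) (l : List Int) (acc : List (Int × Int)) (f : Bool) :
    (l.foldl (fun (st : List (Int × Int) × Bool) r =>
      (st.1 ++ (if st.2 then (g r).reverse else g r).map (fun c => (r, c)), !st.2)) (acc, f)).1
    = acc ++ pvZig g l f := by
  induction l generalizing acc f with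
  | nil => simp [pvZig]
  | cons r t ih => simp [pvZig, List.foldl_cons, ih, List.append_assoc]

theorem pvZig_perm (g : Int → List Int) (l : List Int) (f : Bool) :
    (pvZig g l f).Perm (l.flatMap (fun r => (g r).map (fun c => (r, c)))) := by
  induction l generalizing f with
  | nil => simp [pvZig]
  | cons r t ih =>
    simp only [pvZig, List.flatMap_cons]
    refine List.Perm.append ?_ (ih (!f))
    cases f <;> simp [List.reverse_perm]

-- zigzag over strictly increasing rows with per-row sorted columns is pairwise ≤ under the signed lex key
theorem pvZig_pairwise (pd : Int → Bool) (g : Int → List Int) (l : List Int) (f : Bool)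
    (hgp : ∀ r, (g r).Pairwise (· ≤ ·))
    (hl : l.Pairwise (· < ·))
    (hpd : ∀ i (_ : i < l.length), pd l[i] = (f != decide (i % 2 = 1))) :
    (pvZig g l f).Pairwise (fun x y =>
      (toLex (x.1, if pd x.1 then -x.2 else x.2)) ≤ toLex (y.1, if pd y.1 then -y.2 else y.2)) := by
  induction l generalizing f with
  | nil => simp [pvZig]
  | cons r t ih =>
    have hpr : pd r = f := by simpa using hpd 0 (by simp)
    rw [pvZig, List.pairwise_append]
    refine ⟨?_, ?_, ?_⟩
    · rw [List.pairwise_map]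
      have key2 : ∀ c c' : Int, (if pd r then -c else c) ≤ (if pd r then -c' else c') →
          (fun (x y : Int × Int) => (toLex (x.1, if pd x.1 then -x.2 else x.2)) ≤ toLex (y.1, if pd y.1 then -y.2 else y.2)) (r, c) (r, c') := by
        intro c c' hcc
        exact Prod.Lex.le_iff.2 (Or.inr ⟨rfl, hcc⟩)
      cases hf : f
      · rw [if_neg (by simp)]
        rw [hf] at hpr
        refine (hgp r).imp (fun {c c'} h => key2 c c' ?_)
        simp [hpr, h]
      · rw [if_pos rfl, List.pairwise_reverse]
        rw [hf] at hpr
        refine (hgp r).imp (fun {c c'} h => key2 c' c ?_)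
        simp [hpr, h]
    · refine ih (!f) (List.Pairwise.sublist (List.sublist_cons_self _ _) hl) ?_
      intro i hi
      have h1 := hpd (i+1) (by simpa using hi)
      simp only [List.getElem_cons_succ] at h1
      rw [h1]
      rcases Nat.mod_two_eq_zero_or_one i with h2 | h2
      · have e1 : (i+1) % 2 = 1 := by omega
        cases f <;> simp [h2, e1]
      · have e1 : (i+1) % 2 = 0 := by omega
        cases f <;> simp [h2, e1]
    · intro x hx y hy
      rcases List.mem_map.1 hx with ⟨c, _, rfl⟩
      have hy1 : y.1 ∈ t := pvZig_fst_mem g t (!f) y hy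
      have hlt : r < y.1 := (List.pairwise_cons.1 hl).1 _ hy1
      exact Prod.Lex.le_iff.2 (Or.inl hlt)

-- the per-row sorting loop of A: untouched keys keep their value …
theorem pv_sortfold_getD_not_mem (l : List Int) (d : PySem.Dict Int (List Int)) (r : Int) (h : r ∉ l) :
    (l.foldl (fun d r' => d.insert r' (PySem.List.sorted (d.getD r' []) (fun x => x))) d).getD r []
      = d.getD r [] := by
  induction l generalizing d with
  | nil => rfl
  | cons a t ih =>
    simp only [List.foldl_cons]
    rw [ih _ (fun hm => h (List.mem_cons_of_mem _ hm)),
      PySem.Dict.getD_insert_of_ne _ _ _ (fun he => h (by rw [he]; exact List.mem_cons_self))]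

-- … and each listed key ends up sorted
theorem pv_sortfold_getD_mem (l : List Int) (d : PySem.Dict Int (List Int)) (r : Int)
    (hnd : l.Nodup) (h : r ∈ l) :
    (l.foldl (fun d r' => d.insert r' (PySem.List.sorted (d.getD r' []) (fun x => x))) d).getD r []
      = PySem.List.sorted (d.getD r []) (fun x => x) := by
  induction l generalizing d with
  | nil => simp at h
  | cons a t ih =>
    simp only [List.foldl_cons]
    rcases List.mem_cons.1 h with rfl | hm
    · rw [pv_sortfold_getD_not_mem _ _ _ (List.nodup_cons.1 hnd).1,
        PySem.Dict.getD_insert]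
      simp
    · have hne : r ≠ a := fun he => (List.nodup_cons.1 hnd).1 (he ▸ hm)
      rw [ih _ (List.nodup_cons.1 hnd).2 hm, PySem.Dict.getD_insert_of_ne _ _ _ hne]

-- B's parity-dict loop: untouched keys …
theorem pv_parfold_getD_not_mem (l : List Int) (k : Int) (d : PySem.Dict Int Bool) (r : Int) (h : r ∉ l) :
    ((PySem.List.enumerate l k).foldl (fun d ir => d.insert ir.2 (decide (PySem.Int.mod ir.1 2 = 1))) d).getD r false
      = d.getD r false := by
  induction l generalizing d k with
  | nil => rfl
  | cons a t ih =>
    rw [PySem.List.enumerate_cons]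
    simp only [List.foldl_cons]
    rw [ih _ _ (fun hm => h (List.mem_cons_of_mem _ hm)),
      PySem.Dict.getD_insert_of_ne _ _ _ (fun he => h (by rw [he]; exact List.mem_cons_self))]

-- … and the i-th key of a nodup list gets the parity of k + i
theorem pv_parfold_getD (l : List Int) (k : Int) (d : PySem.Dict Int Bool) (i : Nat)
    (hnd : l.Nodup) (hi : i < l.length) :
    ((PySem.List.enumerate l k).foldl (fun d ir => d.insert ir.2 (decide (PySem.Int.mod ir.1 2 = 1))) d).getD l[i] false
      = decide (PySem.Int.mod (k + i) 2 = 1) := by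
  induction l generalizing d k i with
  | nil => simp at hi
  | cons a t ih =>
    rw [PySem.List.enumerate_cons]
    simp only [List.foldl_cons]
    have hj : ∀ j, j + 1 < (a :: t).length → j < t.length := by intro j hj; simpa using hj
    cases i with
    | zero =>
      rw [pv_parfold_getD_not_mem _ _ _ _ (by simpa using (List.nodup_cons.1 hnd).1),
        PySem.Dict.getD_insert]
      simp
    | succ j =>
      have hjl : j < t.length := hj j hi
      have hm : (a :: t)[j+1] = t[j] := by simp
      rw [hm]
      rw [ih (k+1) _ j (List.nodup_cons.1 hnd).2 hjl]
      congr 1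
      push_cast
      ring_nf

-- a nodup list of exactly the occurring first components partitions cells
theorem pv_flatMap_filter_perm (cs : List (Int × Int)) (l : List Int)
    (hnd : l.Nodup) (hiff : ∀ r, r ∈ l ↔ r ∈ cs.map (fun p => p.1)) :
    (l.flatMap (fun r => cs.filter (fun p => p.1 == r))).Perm cs := by
  induction l generalizing cs with
  | nil =>
    have : cs = [] := by
      cases cs with
      | nil => rfl
      | cons c t => exact absurd ((hiff c.1).2 (by simp)) (by simp)
    simp [this]
  | cons a t ih =>
    rw [List.flatMap_cons]
    have hstep : t.flatMap (fun r => cs.filter (fun p => p.1 == r))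
        = t.flatMap (fun r => (cs.filter (fun p => !(p.1 == a))).filter (fun p => p.1 == r)) := by
      refine List.flatMap_congr ?_
      intro r hr
      have hra : r ≠ a := fun he => (List.nodup_cons.1 hnd).1 (he ▸ hr)
      rw [List.filter_filter]
      refine (List.filter_congr ?_).symm
      intro p _
      by_cases hp : p.1 = r <;> simp [hp, hra]
    rw [hstep]
    have hiff' : ∀ r, r ∈ t ↔ r ∈ (cs.filter (fun p => !(p.1 == a))).map (fun p => p.1) := by
      intro r
      constructor
      · intro hr
        have hra : r ≠ a := fun he => (List.nodup_cons.1 hnd).1 (he ▸ hr)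
        have : r ∈ cs.map (fun p => p.1) := (hiff r).1 (List.mem_cons_of_mem _ hr)
        rcases List.mem_map.1 this with ⟨p, hp, rfl⟩
        exact List.mem_map.2 ⟨p, List.mem_filter.2 ⟨hp, by simpa using hra⟩, rfl⟩
      · intro hr
        rcases List.mem_map.1 hr with ⟨p, hp, rfl⟩
        rcases List.mem_filter.1 hp with ⟨hpc, hpa⟩
        have : p.1 ∈ a :: t := (hiff p.1).2 (List.mem_map.2 ⟨p, hpc, rfl⟩)
        rcases List.mem_cons.1 this with he | ht
        · exact absurd he (by simpa using hpa)
        · exact ht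
    have hperm := ih (cs.filter (fun p => !(p.1 == a))) (List.nodup_cons.1 hnd).2 hiff'
    exact (List.Perm.append_left _ hperm).trans (List.filter_append_perm _ cs)

-- Python's tuple sort key (k1 x, k2 x) is the lexicographic single-key sort
theorem pv_sorted2_eq_sorted_lex {α : Type} (xs : List α) (k1 k2 : α → Int) :
    PySem.List.sorted2 xs k1 k2 = PySem.List.sorted xs (fun x => toLex (k1 x, k2 x)) := by
  rw [PySem.List.sorted_eq_foldl_insertBy]
  show List.foldl (fun acc x => PySem.List.insertBy
      (fun a b => decide (k1 a < k1 b) || !decide (k1 b < k1 a) && decide (k2 a < k2 b)) x acc) [] xs = _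
  have : (fun (a b : α) => decide (k1 a < k1 b) || !decide (k1 b < k1 a) && decide (k2 a < k2 b))
      = fun a b => decide ((toLex (k1 a, k2 a)) < toLex (k1 b, k2 b)) := by
    funext a b
    simp only [Prod.Lex.lt_iff, ofLex_toLex, Bool.decide_or, Bool.decide_and]
    rcases lt_trichotomy (k1 a) (k1 b) with h | h | h <;>
      simp [h, not_lt_of_gt] <;> omega
  rw [this]

theorem pvKey_injective (cells : List (Int × Int)) : Function.Injective (pvKey cells) := by
  intro a b h
  unfold pvKey at h
  have h' : (a.1, if pvPd cells a.1 then -a.2 else a.2) = (b.1, if pvPd cells b.1 then -b.2 else b.2) := by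
    have := congrArg ofLex h
    simpa using this
  have h1 : a.1 = b.1 := (Prod.ext_iff.1 h').1
  have h2 := (Prod.ext_iff.1 h').2
  simp only at h2
  rw [h1] at h2
  refine Prod.ext h1 ?_
  cases hb : pvPd cells b.1 <;> rw [hb] at h2 <;> simp at h2 <;> omega

-- A's grouping dict and its per-row-sorted update
def pvByrow (cells : List (Int × Int)) : PySem.Dict Int (List Int) :=
  cells.foldl (fun d rc => d.modify rc.1 [] (fun l => l ++ [rc.2])) PySem.Dict.empty

def pvByrow2 (cells : List (Int × Int)) : PySem.Dict Int (List Int) :=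
  (PySem.List.sorted (pvByrow cells).keys (fun x => x)).foldl
    (fun d r => d.insert r (PySem.List.sorted (d.getD r []) (fun x => x))) (pvByrow cells)

theorem pvA_eq (cells : List (Int × Int)) : boustrophedon cells
    = pvZig (fun r => (pvByrow2 cells).getD r [])
        (PySem.List.sorted (pvByrow cells).keys (fun x => x)) false := by
  unfold boustrophedon pvByrow2 pvByrow
  simp only [PySem.List.slice?_none_none_neg_one, Option.getD_some]
  exact (pvZig_loop _ _ [] false).trans (List.nil_append _)

theorem pv_keys (cells : List (Int × Int)) :
    (pvByrow cells).keys = PySem.Set.ofList (cells.map (fun rc => rc.1)) := by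
  unfold pvByrow
  rw [PySem.Dict.keys_foldl_modify_key cells (fun rc => rc.1) [] (fun _ rc => fun l => l ++ [rc.2]),
    PySem.Dict.keys_empty, PySem.Set.ofList_eq_foldl]
  simp [PySem.Set.update]

theorem pv_getD (cells : List (Int × Int)) (r : Int) :
    (pvByrow cells).getD r [] = pvGrp cells r := by
  unfold pvByrow pvGrp
  rw [PySem.Dict.getD_foldl_modify_append]
  simp [pysem]

theorem pv_rows_eq (cells : List (Int × Int)) :
    PySem.List.sorted (pvByrow cells).keys (fun x => x) = pvRows cells := by
  unfold pvRows
  rw [pv_keys]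

-- ===== VERDICT (by name: the statement is the Claim_ definition above) =====
theorem boustrophedon_spec : Claim_equal_boustrophedon := by
  unfold Claim_equal_boustrophedon
  intro cells _
  unfold Spec_boustrophedon
  have hrows_nodup : (pvRows cells).Nodup :=
    List.Nodup.perm (PySem.Set.nodup_ofList _) (PySem.List.sorted_perm _ _ _).symm
  have hrows_mem : ∀ r, r ∈ pvRows cells ↔ r ∈ cells.map (fun p => p.1) := by
    intro r
    rw [pvRows, PySem.List.mem_sorted, PySem.Set.mem_ofList]
  -- B's result is the single lexicographic sort by pvKey
  have hB : boustrophedon_alt cells = PySem.List.sorted cells (pvKey cells) := by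
    show PySem.List.sorted2 cells (fun rc => rc.1)
        (fun rc => if (pvParity cells).getD rc.1 false then -rc.2 else rc.2) = _
    rw [pv_sorted2_eq_sorted_lex]
    rfl
  -- A's result is the zigzag concatenation of the sorted per-row column lists
  have hA : boustrophedon cells
      = pvZig (fun r => PySem.List.sorted (pvGrp cells r) (fun x => x)) (pvRows cells) false := by
    rw [pvA_eq, pv_rows_eq]
    refine pvZig_congr _ _ _ _ ?_
    intro r hr
    unfold pvByrow2
    rw [pv_rows_eq]
    rw [pv_sortfold_getD_mem _ _ _ hrows_nodup hr, pv_getD]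
  -- A's result is a permutation of cells
  have hpermA : (boustrophedon cells).Perm cells := by
    rw [hA]
    refine (pvZig_perm _ _ _).trans ?_
    have h1 : ∀ r ∈ pvRows cells,
        ((PySem.List.sorted (pvGrp cells r) (fun x => x)).map (fun c => (r, c))).Perm
          (cells.filter (fun p => p.1 == r)) := by
      intro r _
      refine ((PySem.List.sorted_perm _ _ _).map _).trans ?_
      rw [pvGrp, List.map_map]
      have hid : ∀ p ∈ cells.filter (fun p => p.1 == r),
          ((fun c => (r, c)) ∘ (fun p : Int × Int => p.2)) p = id p := by
        intro p hp
        have hpr : p.1 = r := by simpa using (List.mem_filter.1 hp).2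
        simp [Function.comp, ← hpr]
      rw [List.map_congr_left hid, List.map_id]
    refine (List.Perm.flatMap_left _ h1).trans ?_
    exact pv_flatMap_filter_perm cells (pvRows cells) hrows_nodup hrows_mem
  -- A's result is pairwise nondecreasing under pvKey
  have hpairA : (boustrophedon cells).Pairwise (fun x y => pvKey cells x ≤ pvKey cells y) := by
    rw [hA]
    refine pvZig_pairwise (pvPd cells) _ _ _
      (fun r => PySem.List.sorted_pairwise _ _)
      (PySem.List.sorted_ofList_pairwise_lt _) ?_
    intro i hi
    show pvPd cells (pvRows cells)[i] = _
    unfold pvPd pvParity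
    rw [pv_parfold_getD (pvRows cells) 0 PySem.Dict.empty i hrows_nodup hi]
    have e : PySem.Int.mod ((0 : Int) + i) 2 = ((i % 2 : Nat) : Int) := by
      rw [PySem.Int.mod_eq_emod_of_pos (by norm_num : (0:Int) < 2)]
      push_cast
      omega
    rw [e]
    rcases Nat.mod_two_eq_zero_or_one i with h2 | h2 <;> simp [h2]
  rw [hB]
  exact PySem.List.eq_of_perm_of_pairwise_le_of_injective (pvKey cells) (pvKey_injective cells)
    (hpermA.trans (PySem.List.sorted_perm cells (pvKey cells) false).symm) hpairA
    (PySem.List.sorted_pairwise _ _)
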